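-- pv_equiv track=rewrite | github.com/do0ori/ko-jp-patent-translator | utils/chunker.py | group_paragraphs_to_chunks
-- ===== SOURCE A (Python) =====
-- def group_paragraphs_to_chunks(elements, max_words=2000):
--     chunks, buffer, word_count = [], [], 0
--     for elem in elements:
--         if elem["type"] == "TEXT":
--             words = len(elem["content"].split())
--             if word_count + words > max_words and buffer:
--                 chunks.append({"type": "TEXT", "content": "\n".join(buffer)})
--                 buffer, word_count = [], 0
--             buffer.append(elem["content"])
--             word_count += words
--         elif elem["type"] == "FIGURE":
--             if buffer:
--                 chunks.append({"type": "TEXT", "content": "\n".join(buffer)})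
--                 buffer, word_count = [], 0
--             chunks.append(elem)
--     if buffer:
--         chunks.append({"type": "TEXT", "content": "\n".join(buffer)})
--     return chunks
-- ===== SOURCE B (Python) =====
-- def _chunk_run(contents, max_words):
--     # greedily pack a run of TEXT contents, keeping the chunk text incrementally
--     out = []
--     cur = None  # accumulated chunk text so far, None = empty
--     wc = 0
--     for c in contents:
--         w = len(c.split())
--         if cur is not None and wc + w > max_words:
--             out.append({"type": "TEXT", "content": cur})
--             cur, wc = None, 0
--         cur = c if cur is None else cur + "\n" + c
--         wc += w
--     if cur is not None:
--         out.append({"type": "TEXT", "content": cur})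
--     return out
--
--
-- def group_paragraphs_to_chunks(elements, max_words=2000):
--     # phase 1/2: split into TEXT runs separated by figures; pack each run on the way
--     chunks = []
--     run = []
--     for elem in elements:
--         if elem["type"] == "TEXT":
--             run.append(elem["content"])
--         elif elem["type"] == "FIGURE":
--             chunks += _chunk_run(run, max_words)
--             run = []
--             chunks.append(elem)
--     chunks += _chunk_run(run, max_words)
--     return chunks
-- ===== Notes on version B (the rewrite author's own statement) =====
-- stated objective: alternative
-- what changed: B partitions the elements into TEXT runs separated by FIGUREs and packs each run separately, maintaining the growing chunk text itself (a string, None when empty) instead of A's single interleaved loop over a buffer list flushed via '\n'.join.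
import Mathlib
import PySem

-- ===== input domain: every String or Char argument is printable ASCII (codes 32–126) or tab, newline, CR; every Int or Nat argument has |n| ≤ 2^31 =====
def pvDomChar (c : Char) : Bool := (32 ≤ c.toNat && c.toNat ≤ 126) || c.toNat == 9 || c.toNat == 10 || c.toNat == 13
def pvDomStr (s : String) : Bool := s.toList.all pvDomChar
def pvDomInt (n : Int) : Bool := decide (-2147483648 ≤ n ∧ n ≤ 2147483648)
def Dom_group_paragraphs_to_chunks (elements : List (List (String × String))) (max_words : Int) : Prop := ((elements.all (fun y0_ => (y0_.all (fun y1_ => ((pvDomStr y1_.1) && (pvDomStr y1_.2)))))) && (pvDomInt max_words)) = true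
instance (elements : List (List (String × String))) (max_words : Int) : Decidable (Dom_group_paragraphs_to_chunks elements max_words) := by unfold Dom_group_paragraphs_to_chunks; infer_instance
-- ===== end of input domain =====

-- B regroups the work as: partition the elements into TEXT runs separated by FIGUREs,
-- then greedily pack each run keeping the growing chunk text itself (Option String)
-- instead of A's buffer list flushed via join; same return value (objective: alternative).

-- shared helpers: dict lookup (Python dict semantics: duplicates overwrite), word count, TEXT-chunk dict
def pvDget (e : List (String × String)) (k : String) : String := (PySem.Dict.ofList e).getD k ""
def pvWcount (s : String) : Int := ((PySem.Str.split₀ s).length : Int)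
def pvChunk (content : String) : List (String × String) := [("type", "TEXT"), ("content", content)]

-- ===== PORT A =====
def pvStepA (max_words : Int) (st : List (List (String × String)) × List String × Int) (elem : List (String × String)) : List (List (String × String)) × List String × Int :=
  if pvDget elem "type" = "TEXT" then
    let words := pvWcount (pvDget elem "content")
    let st1 := if st.2.2 + words > max_words ∧ st.2.1 ≠ [] then
        (st.1 ++ [pvChunk (PySem.Str.join "\n" st.2.1)], ([] : List String), (0 : Int))
      else st
    (st1.1, st1.2.1 ++ [pvDget elem "content"], st1.2.2 + words)
  else if pvDget elem "type" = "FIGURE" then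
    let st1 := if st.2.1 ≠ [] then
        (st.1 ++ [pvChunk (PySem.Str.join "\n" st.2.1)], ([] : List String), (0 : Int))
      else st
    (st1.1 ++ [(PySem.Dict.ofList elem).items], st1.2.1, st1.2.2)
  else st

def group_paragraphs_to_chunks (elements : List (List (String × String))) (max_words : Int) : List (List (String × String)) :=
  let st := elements.foldl (pvStepA max_words) ([], [], 0)
  if st.2.1 ≠ [] then st.1 ++ [pvChunk (PySem.Str.join "\n" st.2.1)] else st.1

-- ===== PORT B =====
def pvStepRun (max_words : Int) (st : List (List (String × String)) × Option String × Int) (c : String) : List (List (String × String)) × Option String × Int :=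
  let w := pvWcount c
  let st1 := match st.2.1 with
    | some t => if st.2.2 + w > max_words then (st.1 ++ [pvChunk t], (none : Option String), (0 : Int)) else st
    | none => st
  (st1.1, some (match st1.2.1 with | none => c | some t => t ++ "\n" ++ c), st1.2.2 + w)

def pvChunkRun (contents : List String) (max_words : Int) : List (List (String × String)) :=
  let st := contents.foldl (pvStepRun max_words) ([], none, 0)
  match st.2.1 with
  | some t => st.1 ++ [pvChunk t]
  | none => st.1

def pvStepB (max_words : Int) (st : List (List (String × String)) × List String) (elem : List (String × String)) : List (List (String × String)) × List String :=
  if pvDget elem "type" = "TEXT" then (st.1, st.2 ++ [pvDget elem "content"])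
  else if pvDget elem "type" = "FIGURE" then
    (st.1 ++ pvChunkRun st.2 max_words ++ [(PySem.Dict.ofList elem).items], ([] : List String))
  else st

def group_paragraphs_to_chunks_alt (elements : List (List (String × String))) (max_words : Int) : List (List (String × String)) :=
  let st := elements.foldl (pvStepB max_words) ([], [])
  st.1 ++ pvChunkRun st.2 max_words

-- ===== PRECONDITION & SPEC =====
-- Pre_ excludes exactly the inputs where Python A raises KeyError: an element without a
-- "type" key, or a "TEXT" element without a "content" key.
def Pre_group_paragraphs_to_chunks (elements : List (List (String × String))) (max_words : Int) : Prop :=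
  ∀ e ∈ elements, (PySem.Dict.ofList e).get? "type" ≠ none ∧
    ((PySem.Dict.ofList e).get? "type" = some "TEXT" → (PySem.Dict.ofList e).get? "content" ≠ none)
instance (elements : List (List (String × String))) (max_words : Int) : Decidable (Pre_group_paragraphs_to_chunks elements max_words) := by unfold Pre_group_paragraphs_to_chunks; infer_instance

def pvWitness_group_paragraphs_to_chunks : (List (List (String × String))) × Int :=
  ([[("type", "TEXT"), ("content", "a b c")], [("type", "FIGURE"), ("src", "f1")], [("type", "TEXT"), ("content", "d e")]], 2)

def Spec_group_paragraphs_to_chunks (elements : List (List (String × String))) (max_words : Int) (out : List (List (String × String))) : Prop := out = group_paragraphs_to_chunks_alt elements max_words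
instance (elements : List (List (String × String))) (max_words : Int) (out : List (List (String × String))) : Decidable (Spec_group_paragraphs_to_chunks elements max_words out) := by unfold Spec_group_paragraphs_to_chunks; infer_instance

-- ===== CLAIM (what is proved, stated in full; the proofs are below) =====
def Claim_equal_group_paragraphs_to_chunks : Prop := ∀ (elements : List (List (String × String))) (max_words : Int), Dom_group_paragraphs_to_chunks elements max_words → Pre_group_paragraphs_to_chunks elements max_words → Spec_group_paragraphs_to_chunks elements max_words (group_paragraphs_to_chunks elements max_words)

-- ===== LEMMAS AND PROOFS =====

theorem pv_chars_join_append (sep : List Char) (l : List (List Char)) (c : List Char) (h : l ≠ []) :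
    PySem.Chars.join sep (l ++ [c]) = PySem.Chars.join sep l ++ sep ++ c := by
  induction l with
  | nil => exact absurd rfl h
  | cons x xs ih =>
    cases xs with
    | nil => simp [PySem.Chars.join_cons_cons, PySem.Chars.join_singleton]
    | cons y ys =>
      have := ih (by simp)
      simp only [List.cons_append, PySem.Chars.join_cons_cons] at *
      rw [this]
      simp [List.append_assoc]

theorem pv_join_singleton (c : String) : PySem.Str.join "\n" [c] = c := by
  apply String.toList_inj.mp
  simp [PySem.Str.toList_join, PySem.Chars.join_singleton]

theorem pv_join_append (buf : List String) (c : String) (h : buf ≠ []) :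
    PySem.Str.join "\n" (buf ++ [c]) = PySem.Str.join "\n" buf ++ "\n" ++ c := by
  apply String.toList_inj.mp
  simp only [PySem.Str.toList_join, List.map_append, List.map_cons, List.map_nil,
    String.toList_append]
  rw [pv_chars_join_append _ _ _ (by simpa using h)]

-- the joined current chunk text B maintains, expressed from A's buffer
def pvJoinOpt (buffer : List String) : Option String :=
  if buffer = [] then none else some (PySem.Str.join "\n" buffer)

-- the two finishing steps, as proof-side names
def pvFinA (st : List (List (String × String)) × List String × Int) : List (List (String × String)) :=
  if st.2.1 ≠ [] then st.1 ++ [pvChunk (PySem.Str.join "\n" st.2.1)] else st.1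

def pvFinB (mw : Int) (st : List (List (String × String)) × List String) : List (List (String × String)) :=
  st.1 ++ pvChunkRun st.2 mw

theorem pv_main (mw : Int) (elements : List (List (String × String))) :
    ∀ (chunksB : List (List (String × String))) (run buffer : List String) (wc : Int),
    (run.foldl (pvStepRun mw) ([], none, 0)).2.1 = pvJoinOpt buffer →
    (run.foldl (pvStepRun mw) ([], none, 0)).2.2 = wc →
    (buffer = [] → wc = 0) →
    pvFinA (elements.foldl (pvStepA mw) (chunksB ++ (run.foldl (pvStepRun mw) ([], none, 0)).1, buffer, wc))
    = pvFinB mw (elements.foldl (pvStepB mw) (chunksB, run)) := by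
  induction elements with
  | nil =>
    intro chunksB run buffer wc h1 h2 h3
    simp only [List.foldl_nil, pvFinA, pvFinB, pvChunkRun]
    by_cases hb : buffer = []
    · rw [h1]
      simp [pvJoinOpt, hb]
    · rw [h1]
      simp [pvJoinOpt, hb]
  | cons e rest ih =>
    intro chunksB run buffer wc h1 h2 h3
    simp only [List.foldl_cons]
    by_cases hT : pvDget e "type" = "TEXT"
    · by_cases hb : buffer = []
      · -- empty buffer: no flush on either side
        have hcur : (run.foldl (pvStepRun mw) ([], none, 0)).2.1 = none := by
          rw [h1]; simp [pvJoinOpt, hb]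
        have hA : pvStepA mw (chunksB ++ (run.foldl (pvStepRun mw) ([], none, 0)).1, buffer, wc) e
            = (chunksB ++ (run.foldl (pvStepRun mw) ([], none, 0)).1, [pvDget e "content"], wc + pvWcount (pvDget e "content")) := by
          simp [pvStepA, hT, hb]
        have hB : pvStepB mw (chunksB, run) e = (chunksB, run ++ [pvDget e "content"]) := by
          simp [pvStepB, hT]
        have hrf : (run ++ [pvDget e "content"]).foldl (pvStepRun mw) ([], none, 0)
            = ((run.foldl (pvStepRun mw) ([], none, 0)).1, some (pvDget e "content"), wc + pvWcount (pvDget e "content")) := by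
          rw [List.foldl_append]
          simp only [List.foldl_cons, List.foldl_nil, pvStepRun, hcur, h2]
        rw [hA, hB]
        have := ih chunksB (run ++ [pvDget e "content"]) [pvDget e "content"] (wc + pvWcount (pvDget e "content"))
          (by rw [hrf]; simp [pvJoinOpt, pv_join_singleton])
          (by rw [hrf])
          (by simp)
        rw [hrf] at this
        exact this
      · by_cases hf : wc + pvWcount (pvDget e "content") > mw
        · -- flush, then start a new buffer with this content
          have hcur : (run.foldl (pvStepRun mw) ([], none, 0)).2.1 = some (PySem.Str.join "\n" buffer) := by
            rw [h1]; simp [pvJoinOpt, hb]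
          have hA : pvStepA mw (chunksB ++ (run.foldl (pvStepRun mw) ([], none, 0)).1, buffer, wc) e
              = ((chunksB ++ (run.foldl (pvStepRun mw) ([], none, 0)).1) ++ [pvChunk (PySem.Str.join "\n" buffer)], [pvDget e "content"], 0 + pvWcount (pvDget e "content")) := by
            simp [pvStepA, hT, hb, hf]
          have hB : pvStepB mw (chunksB, run) e = (chunksB, run ++ [pvDget e "content"]) := by
            simp [pvStepB, hT]
          have hrf : (run ++ [pvDget e "content"]).foldl (pvStepRun mw) ([], none, 0)
              = ((run.foldl (pvStepRun mw) ([], none, 0)).1 ++ [pvChunk (PySem.Str.join "\n" buffer)], some (pvDget e "content"), 0 + pvWcount (pvDget e "content")) := by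
            rw [List.foldl_append]
            simp only [List.foldl_cons, List.foldl_nil, pvStepRun, hcur, h2]
            simp [hf]
          rw [hA, hB]
          have := ih chunksB (run ++ [pvDget e "content"]) [pvDget e "content"] (0 + pvWcount (pvDget e "content"))
            (by rw [hrf]; simp [pvJoinOpt, pv_join_singleton])
            (by rw [hrf])
            (by simp)
          rw [hrf] at this
          rw [← List.append_assoc] at this
          exact this
        · -- no flush: append to the buffer / extend the current chunk text
          have hcur : (run.foldl (pvStepRun mw) ([], none, 0)).2.1 = some (PySem.Str.join "\n" buffer) := by
            rw [h1]; simp [pvJoinOpt, hb]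
          have hA : pvStepA mw (chunksB ++ (run.foldl (pvStepRun mw) ([], none, 0)).1, buffer, wc) e
              = (chunksB ++ (run.foldl (pvStepRun mw) ([], none, 0)).1, buffer ++ [pvDget e "content"], wc + pvWcount (pvDget e "content")) := by
            simp [pvStepA, hT, hf]
          have hB : pvStepB mw (chunksB, run) e = (chunksB, run ++ [pvDget e "content"]) := by
            simp [pvStepB, hT]
          have hrf : (run ++ [pvDget e "content"]).foldl (pvStepRun mw) ([], none, 0)
              = ((run.foldl (pvStepRun mw) ([], none, 0)).1, some (PySem.Str.join "\n" buffer ++ "\n" ++ pvDget e "content"), wc + pvWcount (pvDget e "content")) := by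
            rw [List.foldl_append]
            simp only [List.foldl_cons, List.foldl_nil, pvStepRun, hcur, h2]
            simp only [hf, if_false]
            rw [hcur, h2]
          rw [hA, hB]
          have := ih chunksB (run ++ [pvDget e "content"]) (buffer ++ [pvDget e "content"]) (wc + pvWcount (pvDget e "content"))
            (by rw [hrf]; simp [pvJoinOpt, pv_join_append buffer _ hb])
            (by rw [hrf])
            (by simp)
          rw [hrf] at this
          exact this
    · by_cases hF : pvDget e "type" = "FIGURE"
      · by_cases hb : buffer = []
        · have hcur : (run.foldl (pvStepRun mw) ([], none, 0)).2.1 = none := by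
            rw [h1]; simp [pvJoinOpt, hb]
          have hwc : wc = 0 := h3 hb
          have hA : pvStepA mw (chunksB ++ (run.foldl (pvStepRun mw) ([], none, 0)).1, buffer, wc) e
              = ((chunksB ++ (run.foldl (pvStepRun mw) ([], none, 0)).1) ++ [(PySem.Dict.ofList e).items], buffer, wc) := by
            simp [pvStepA, hF, hb]
          have hck : pvChunkRun run mw = (run.foldl (pvStepRun mw) ([], none, 0)).1 := by
            simp only [pvChunkRun, hcur]
          have hB : pvStepB mw (chunksB, run) e
              = (chunksB ++ (run.foldl (pvStepRun mw) ([], none, 0)).1 ++ [(PySem.Dict.ofList e).items], ([] : List String)) := by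
            simp [pvStepB, hF, hck]
          rw [hA, hB]
          have := ih (chunksB ++ (run.foldl (pvStepRun mw) ([], none, 0)).1 ++ [(PySem.Dict.ofList e).items]) [] buffer wc
            (by simp only [List.foldl_nil]; simp [pvJoinOpt, hb])
            (by simp [List.foldl_nil, hwc])
            h3
          simpa using this
        · have hcur : (run.foldl (pvStepRun mw) ([], none, 0)).2.1 = some (PySem.Str.join "\n" buffer) := by
            rw [h1]; simp [pvJoinOpt, hb]
          have hA : pvStepA mw (chunksB ++ (run.foldl (pvStepRun mw) ([], none, 0)).1, buffer, wc) e
              = ((chunksB ++ (run.foldl (pvStepRun mw) ([], none, 0)).1 ++ [pvChunk (PySem.Str.join "\n" buffer)]) ++ [(PySem.Dict.ofList e).items], ([] : List String), (0 : Int)) := by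
            simp [pvStepA, hF, hb]
          have hck : pvChunkRun run mw = (run.foldl (pvStepRun mw) ([], none, 0)).1 ++ [pvChunk (PySem.Str.join "\n" buffer)] := by
            simp only [pvChunkRun, hcur]
          have hB : pvStepB mw (chunksB, run) e
              = (chunksB ++ ((run.foldl (pvStepRun mw) ([], none, 0)).1 ++ [pvChunk (PySem.Str.join "\n" buffer)]) ++ [(PySem.Dict.ofList e).items], ([] : List String)) := by
            simp [pvStepB, hF, hck]
          rw [hA, hB]
          have := ih (chunksB ++ ((run.foldl (pvStepRun mw) ([], none, 0)).1 ++ [pvChunk (PySem.Str.join "\n" buffer)]) ++ [(PySem.Dict.ofList e).items]) [] [] 0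
            (by simp [pvJoinOpt])
            (by simp)
            (fun _ => rfl)
          simp only [List.foldl_nil, List.append_nil] at this
          rw [← List.append_assoc] at this ⊢
          convert this using 3
      · have hA : pvStepA mw (chunksB ++ (run.foldl (pvStepRun mw) ([], none, 0)).1, buffer, wc) e
            = (chunksB ++ (run.foldl (pvStepRun mw) ([], none, 0)).1, buffer, wc) := by
          simp [pvStepA, hT, hF]
        have hB : pvStepB mw (chunksB, run) e = (chunksB, run) := by
          simp [pvStepB, hT, hF]
        rw [hA, hB]
        exact ih chunksB run buffer wc h1 h2 h3

-- ===== VERDICT (by name: the statement is the Claim_ definition above) =====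
theorem group_paragraphs_to_chunks_spec : Claim_equal_group_paragraphs_to_chunks := by
  intro elements max_words _hdom _hpre
  unfold Spec_group_paragraphs_to_chunks
  have h := pv_main max_words elements [] [] [] 0
    (by simp [pvJoinOpt]) (by simp) (fun _ => rfl)
  simp only [List.foldl_nil, List.nil_append] at h
  exact h
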